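-- pv_equiv track=rewrite | github.com/ShivaniBhalerao/WalletAI | learning/langgraph_number_adder.py | has_written_numbers
-- ===== SOURCE A (Python) =====
-- def has_written_numbers(text: str) -> bool:
--     """
--     Check if text likely contains written numbers (one, two, three, etc.).
--
--     Args:
--         text: Input text to check
--
--     Returns:
--         True if text likely contains written numbers
--     """
--     written_number_words = [
--         "zero", "one", "two", "three", "four", "five", "six", "seven", "eight", "nine", "ten",
--         "eleven", "twelve", "thirteen", "fourteen", "fifteen", "sixteen", "seventeen",
--         "eighteen", "nineteen", "twenty"
--     ]
--     text_lower = text.lower()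
--     return any(word in text_lower for word in written_number_words)
-- ===== SOURCE B (Python) =====
-- WRITTEN_NUMBER_WORDS = [
--     "zero", "one", "two", "three", "four", "five", "six", "seven", "eight", "nine", "ten",
--     "eleven", "twelve", "thirteen", "fourteen", "fifteen", "sixteen", "seventeen",
--     "eighteen", "nineteen", "twenty"
-- ]
--
--
-- def _build_trie(words):
--     # Flat trie: node 0 is the root; terminal[n] marks the end of a word,
--     # children[n] maps a character to the child node index.
--     terminal = [False]
--     children = [{}]
--     for w in words:
--         cur = 0
--         for ch in w:
--             nxt = children[cur].get(ch)
--             if nxt is None: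
--                 children.append({})
--                 terminal.append(False)
--                 nxt = len(children) - 1
--                 children[cur][ch] = nxt
--             cur = nxt
--         terminal[cur] = True
--     return terminal, children
--
--
-- _TERMINAL, _CHILDREN = _build_trie(WRITTEN_NUMBER_WORDS)
--
--
-- def has_written_numbers(text: str) -> bool:
--     # Aho-Corasick-style multi-pattern scan: one pass over the lowercased text,
--     # maintaining the set of trie nodes reached by suffixes of the text read so
--     # far (plain substring semantics: a match may start/end anywhere).
--     active = set()
--     for ch in text.lower():
--         new_active = set()
--         for st in active | {0}:
--             nxt = _CHILDREN[st].get(ch)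
--             if nxt is not None:
--                 if _TERMINAL[nxt]:
--                     return True
--                 new_active.add(nxt)
--         active = new_active
--     return False
-- ===== Notes on version B (the rewrite author's own statement) =====
-- stated objective: alternative
-- what changed: B builds a trie of the 21 number words once and makes a single Aho-Corasick-style pass over the lowercased text, maintaining the set of active trie nodes, instead of A's 21 independent whole-text substring scans.
import Mathlib
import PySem

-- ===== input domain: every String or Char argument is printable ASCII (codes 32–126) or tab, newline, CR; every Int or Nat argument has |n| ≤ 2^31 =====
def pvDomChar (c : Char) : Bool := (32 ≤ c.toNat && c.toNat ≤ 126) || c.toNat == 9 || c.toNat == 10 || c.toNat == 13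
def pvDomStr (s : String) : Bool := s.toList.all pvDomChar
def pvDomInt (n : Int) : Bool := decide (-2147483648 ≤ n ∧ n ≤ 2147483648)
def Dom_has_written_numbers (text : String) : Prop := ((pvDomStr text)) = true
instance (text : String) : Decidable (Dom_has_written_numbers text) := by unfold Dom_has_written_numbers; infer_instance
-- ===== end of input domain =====

-- B replaces A's 21 independent whole-text substring scans by a trie of the words
-- built once and a single Aho-Corasick-style pass over the lowercased text that
-- maintains the set of active trie nodes (objective: alternative).

-- ===== PORT A =====
-- A: build the word list, lower the text once, then `any(word in text_lower …)`.
def has_written_numbers (text : String) : Bool :=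
  let written_number_words : List String :=
    ["zero", "one", "two", "three", "four", "five", "six", "seven", "eight", "nine", "ten",
     "eleven", "twelve", "thirteen", "fourteen", "fifteen", "sixteen", "seventeen",
     "eighteen", "nineteen", "twenty"]
  let text_lower := PySem.Str.lower text
  written_number_words.any (fun word => PySem.Str.isIn word text_lower)

-- ===== PORT B =====
def pvWordsB : List String :=
  ["zero", "one", "two", "three", "four", "five", "six", "seven", "eight", "nine", "ten",
   "eleven", "twelve", "thirteen", "fourteen", "fifteen", "sixteen", "seventeen",
   "eighteen", "nineteen", "twenty"]

-- Source B's `_build_trie`: inner `for ch in w` body (node 0 is the root).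
def pvTrieStepChar (acc : (List Bool × List (PySem.Dict Char Nat)) × Nat) (ch : Char) :
    (List Bool × List (PySem.Dict Char Nat)) × Nat :=
  let terminal := acc.1.1
  let children := acc.1.2
  let cur := acc.2
  match (children.getD cur PySem.Dict.empty).get? ch with
  | some nxt => ((terminal, children), nxt)
  | none =>
      let children2 := children ++ [PySem.Dict.empty]
      let terminal2 := terminal ++ [false]
      let nxt := children2.length - 1
      ((terminal2, children2.set cur ((children2.getD cur PySem.Dict.empty).insert ch nxt)), nxt)

-- Source B's `_build_trie`: outer `for w in words` body (walk/extend, then mark terminal).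
def pvTrieInsert (st : List Bool × List (PySem.Dict Char Nat)) (w : String) :
    List Bool × List (PySem.Dict Char Nat) :=
  let r := w.toList.foldl pvTrieStepChar (st, 0)
  (r.1.1.set r.2 true, r.1.2)

-- module-level `_TERMINAL, _CHILDREN = _build_trie(WRITTEN_NUMBER_WORDS)`
def pvTrie : List Bool × List (PySem.Dict Char Nat) :=
  pvWordsB.foldl pvTrieInsert ([false], [PySem.Dict.empty])

def pvTerm : List Bool := pvTrie.1
def pvChildren : List (PySem.Dict Char Nat) := pvTrie.2

-- Source B's scan loop body: advance every node of `active | {0}` by `ch`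
-- (the `return True` on a terminal child becomes a found-flag that freezes the fold).
def pvScanBody (ch : Char) (acc : Bool × PySem.Set Nat) (n : Nat) : Bool × PySem.Set Nat :=
  if acc.1 then acc
  else
    match (pvChildren.getD n PySem.Dict.empty).get? ch with
    | none => acc
    | some nxt =>
        if pvTerm.getD nxt false then (true, acc.2)
        else (acc.1, PySem.Set.add acc.2 nxt)

def pvScanStep (st : Bool × PySem.Set Nat) (ch : Char) : Bool × PySem.Set Nat :=
  if st.1 then st
  else
    (PySem.Set.union st.2 (PySem.Set.ofList [0])).foldl (pvScanBody ch) (false, PySem.Set.empty)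

def has_written_numbers_alt (text : String) : Bool :=
  ((PySem.Str.lower text).toList.foldl pvScanStep (false, PySem.Set.empty)).1

-- ===== PRECONDITION & SPEC =====
def Spec_has_written_numbers (text : String) (out : Bool) : Prop := out = has_written_numbers_alt text
instance (text : String) (out : Bool) : Decidable (Spec_has_written_numbers text out) := by unfold Spec_has_written_numbers; infer_instance

-- ===== CLAIM (what is proved, stated in full; the proofs are below) =====
def Claim_equal_has_written_numbers : Prop := ∀ (text : String), Dom_has_written_numbers text → Spec_has_written_numbers text (has_written_numbers text)

-- ===== LEMMAS AND PROOFS =====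

set_option maxRecDepth 10000

-- The transition function of the built trie, and the walk from the root.
def pvDelta (n : Nat) (c : Char) : Option Nat :=
  (pvChildren.getD n PySem.Dict.empty).get? c

def pvWalk (cs : List Char) : Option Nat :=
  cs.foldl (fun o c => o.bind (fun n => pvDelta n c)) (some 0)

def pvHitsTerm (cs : List Char) : Bool :=
  match pvWalk cs with
  | some n => pvTerm.getD n false
  | none => false

-- All edges of the (concrete, closed) trie that enter node n.
def pvInEdges (n : Nat) : List (Nat × Char) :=
  (List.range 82).flatMap (fun m =>
    ((pvChildren.getD m PySem.Dict.empty).items).filterMap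
      (fun p => if p.2 = n then some (m, p.1) else none))

-- Decided facts about the concrete trie.
theorem pv_trie_sizes : pvChildren.length = 82 ∧ pvTerm.length = 82 := by decide

theorem pv_targets :
    ((List.range 82).all (fun m => ((pvChildren.getD m PySem.Dict.empty).items).all
      (fun p => decide (p.2 < 82 ∧ p.2 ≠ 0)))) = true := by decide

theorem pv_in_edges_unique :
    (pvInEdges 0).length = 0 ∧
      ((List.range 82).all (fun n => n = 0 || (pvInEdges n).length == 1)) = true := by decide

theorem pv_words_hit : pvWordsB.all (fun w => pvHitsTerm w.toList) = true := by decide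

theorem pv_term_is_word :
    ((List.range 82).all (fun n => !pvTerm.getD n false ||
      pvWordsB.any (fun w => pvWalk w.toList == some n))) = true := by decide

theorem pv_words_ne_nil : pvWordsB.all (fun w => !w.toList.isEmpty) = true := by decide

-- δ-range: a transition always leads from a real node to a real non-root node.
theorem pvDelta_range {m : Nat} {c : Char} {n : Nat} (h : pvDelta m c = some n) :
    m < 82 ∧ n < 82 ∧ n ≠ 0 := by
  unfold pvDelta at h
  by_cases hm : m < 82
  · have hmem := PySem.Dict.mem_items_of_get?_eq_some _ h
    have h1 := List.all_eq_true.mp pv_targets m (List.mem_range.mpr hm)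
    have h2 := of_decide_eq_true (List.all_eq_true.mp h1 (c, n) hmem)
    exact ⟨hm, h2.1, h2.2⟩
  · have hge : pvChildren.length ≤ m := by rw [pv_trie_sizes.1]; omega
    rw [List.getD_eq_default _ _ hge] at h
    simp [PySem.Dict.get?_empty] at h

-- Membership in pvInEdges characterises δ.
theorem mem_pvInEdges_of_delta {m : Nat} {c : Char} {n : Nat} (h : pvDelta m c = some n) :
    (m, c) ∈ pvInEdges n := by
  have hm := (pvDelta_range h).1
  unfold pvDelta at h
  have hmem := PySem.Dict.mem_items_of_get?_eq_some _ h
  unfold pvInEdges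
  exact List.mem_flatMap.mpr ⟨m, List.mem_range.mpr hm,
    List.mem_filterMap.mpr ⟨(c, n), hmem, by simp⟩⟩

-- Each non-root node has exactly one incoming edge, the root none.
theorem pvDelta_inj {m m' : Nat} {c c' : Char} {n : Nat}
    (h : pvDelta m c = some n) (h' : pvDelta m' c' = some n) : m = m' ∧ c = c' := by
  obtain ⟨-, hn, hn0⟩ := pvDelta_range h
  have e1 := mem_pvInEdges_of_delta h
  have e2 := mem_pvInEdges_of_delta h'
  have hu := List.all_eq_true.mp pv_in_edges_unique.2 n (List.mem_range.mpr hn)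
  rcases Bool.or_eq_true_iff.mp hu with h0 | h1
  · exact absurd (by exact_mod_cast of_decide_eq_true h0) hn0
  · obtain ⟨x, hx⟩ := List.length_eq_one_iff.mp (Nat.beq_eq_true_eq _ _ |>.mp h1)
    rw [hx] at e1 e2
    have := (List.mem_singleton.mp e1).trans (List.mem_singleton.mp e2).symm
    exact ⟨congrArg Prod.fst this, congrArg Prod.snd this⟩

theorem pvWalk_append (cs : List Char) (c : Char) :
    pvWalk (cs ++ [c]) = (pvWalk cs).bind (fun n => pvDelta n c) := by
  simp [pvWalk, List.foldl_append]

theorem pvWalk_range {cs : List Char} {n : Nat} (h : pvWalk cs = some n) : n < 82 := by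
  rcases List.eq_nil_or_concat cs with rfl | ⟨t, a, rfl⟩
  · simp only [pvWalk, List.foldl_nil, Option.some.injEq] at h
    omega
  · rw [List.concat_eq_append, pvWalk_append] at h
    cases ht : pvWalk t with
    | none => rw [ht] at h; simp at h
    | some m => rw [ht] at h; exact (pvDelta_range h).2.1

-- The walk is injective: two strings reaching the same node are equal.
theorem pvWalk_inj (cs : List Char) : ∀ ds n, pvWalk cs = some n → pvWalk ds = some n → cs = ds := by
  induction cs using List.reverseRecOn with
  | nil =>
    intro ds n h1 h2
    simp only [pvWalk, List.foldl_nil, Option.some.injEq] at h1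
    rcases List.eq_nil_or_concat ds with rfl | ⟨u, b, rfl⟩
    · rfl
    · rw [List.concat_eq_append, pvWalk_append] at h2
      cases hu : pvWalk u with
      | none => rw [hu] at h2; simp at h2
      | some m =>
        rw [hu] at h2
        exact absurd (h1 ▸ (pvDelta_range h2).2.2) (by simp)
  | append_singleton t a ih =>
    intro ds n h1 h2
    rw [pvWalk_append] at h1
    cases ht : pvWalk t with
    | none => rw [ht] at h1; simp at h1
    | some m =>
      rw [ht] at h1
      simp only [Option.bind_some] at h1
      rcases List.eq_nil_or_concat ds with rfl | ⟨u, b, rfl⟩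
      · simp only [pvWalk, List.foldl_nil, Option.some.injEq] at h2
        exact absurd (h2 ▸ (pvDelta_range h1).2.2) (by simp)
      · rw [List.concat_eq_append, pvWalk_append] at h2
        cases hu : pvWalk u with
        | none => rw [hu] at h2; simp at h2
        | some m' =>
          rw [hu] at h2
          simp only [Option.bind_some] at h2
          obtain ⟨hm, hc⟩ := pvDelta_inj h1 h2
          subst hm hc
          rw [ih u m ht hu]; simp

-- The walk hits a terminal node exactly on the number words.
theorem pvHitsTerm_iff (cs : List Char) :
    pvHitsTerm cs = true ↔ ∃ w ∈ pvWordsB, w.toList = cs := by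
  constructor
  · intro h
    have hsome : ∃ n, pvWalk cs = some n ∧ pvTerm.getD n false = true := by
      unfold pvHitsTerm at h
      cases hw : pvWalk cs with
      | none => rw [hw] at h; simp at h
      | some n => rw [hw] at h; exact ⟨n, rfl, by simpa using h⟩
    obtain ⟨n, hw, hterm⟩ := hsome
    have hn := pvWalk_range hw
    have h1 := List.all_eq_true.mp pv_term_is_word n (List.mem_range.mpr hn)
    rcases Bool.or_eq_true_iff.mp h1 with h0 | h2
    · rw [Bool.not_eq_true'] at h0
      rw [h0] at hterm
      exact absurd hterm Bool.false_ne_true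
    · obtain ⟨w, hwmem, hww⟩ := List.any_eq_true.mp h2
      have hww' : pvWalk w.toList = some n := by simpa using hww
      exact ⟨w, hwmem, pvWalk_inj w.toList cs n hww' hw⟩
  · rintro ⟨w, hw, rfl⟩
    exact List.all_eq_true.mp pv_words_hit w hw

-- Suffixes of p ++ [c] are [] and s ++ [c] for suffixes s of p.
theorem suffix_concat_char {s' p : List Char} {c : Char} :
    s' <:+ p ++ [c] ↔ s' = [] ∨ ∃ s, s <:+ p ∧ s' = s ++ [c] := by
  constructor
  · rintro ⟨u, hu⟩
    rcases List.eq_nil_or_concat s' with rfl | ⟨t, a, rfl⟩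
    · left; rfl
    · right
      rw [List.concat_eq_append, ← List.append_assoc] at hu
      have h2 : a = c := by
        have := congrArg (fun l => l.getLast?) hu
        simpa [List.getLast?_concat] using this
      subst h2
      have h3 : u ++ t = p := by
        have := congrArg List.dropLast hu
        simpa [List.dropLast_concat] using this
      exact ⟨t, ⟨u, h3⟩, by simp⟩
  · rintro (rfl | ⟨s, ⟨u, hu⟩, rfl⟩)
    · exact List.nil_suffix
    · exact ⟨u, by rw [← List.append_assoc, hu]⟩

-- An infix of p ++ [c] is an infix of p or a suffix of p ++ [c].
theorem infix_concat_char {w p : List Char} {c : Char} :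
    w <:+: p ++ [c] ↔ w <:+: p ∨ w <:+ p ++ [c] := by
  constructor
  · rintro ⟨u, v, huv⟩
    rcases List.eq_nil_or_concat v with rfl | ⟨t, a, rfl⟩
    · right; exact ⟨u, by simpa using huv⟩
    · left
      rw [List.concat_eq_append, ← List.append_assoc] at huv
      have h3 : (u ++ w) ++ t = p := by
        have := congrArg List.dropLast huv
        simpa [List.dropLast_concat] using this
      exact ⟨u, t, by rw [← h3, List.append_assoc]⟩
  · rintro (h | h)
    · exact h.trans ⟨[], [c], by simp⟩
    · exact h.isInfix

-- The loop invariant of B's scan.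
def pvInv (p : List Char) (st : Bool × PySem.Set Nat) : Prop :=
  (st.1 = true ↔ ∃ w ∈ pvWordsB, w.toList <:+: p) ∧
  (st.1 = false → ∀ n, n ∈ st.2 ↔ ∃ s, s ≠ [] ∧ s <:+ p ∧ pvWalk s = some n)

-- Characterisation of the inner fold over the active states.
theorem pv_inner_fold (c : Char) (L : List Nat) (acc : Bool × PySem.Set Nat) :
    ((L.foldl (pvScanBody c) acc).1 = true ↔
      acc.1 = true ∨ ∃ n ∈ L, ∃ t, pvDelta n c = some t ∧ pvTerm.getD t false = true) ∧
    ((L.foldl (pvScanBody c) acc).1 = false →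
      acc.1 = false ∧ ∀ m, (m ∈ (L.foldl (pvScanBody c) acc).2 ↔
        m ∈ acc.2 ∨ ∃ n ∈ L, pvDelta n c = some m)) := by
  induction L generalizing acc with
  | nil => simp
  | cons h L ih =>
    rw [List.foldl_cons]
    by_cases hacc : acc.1 = true
    · have hbody : pvScanBody c acc h = acc := by simp [pvScanBody, hacc]
      rw [hbody]
      refine ⟨?_, ?_⟩
      · rw [(ih acc).1]; simp [hacc]
      · intro hf
        exact absurd ((ih acc).2 hf).1 (by simp [hacc])
    · rw [Bool.not_eq_true] at hacc
      have hd : pvDelta h c = (pvChildren.getD h PySem.Dict.empty).get? c := rfl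
      cases hdc : (pvChildren.getD h PySem.Dict.empty).get? c with
      | none =>
        have hbody : pvScanBody c acc h = acc := by
          simp only [pvScanBody, hacc, hdc]; simp
        rw [hbody]
        refine ⟨?_, ?_⟩
        · rw [(ih acc).1]
          constructor
          · rintro (h1 | ⟨n, hn, hex⟩)
            · exact Or.inl h1
            · exact Or.inr ⟨n, List.mem_cons_of_mem _ hn, hex⟩
          · rintro (h1 | ⟨n, hn, t, hnd, ht⟩)
            · exact Or.inl h1
            · rcases List.mem_cons.mp hn with rfl | hn'
              · rw [hd, hdc] at hnd; cases hnd
              · exact Or.inr ⟨n, hn', t, hnd, ht⟩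
        · intro hf
          obtain ⟨h1, h2⟩ := (ih acc).2 hf
          refine ⟨h1, fun m => ?_⟩
          rw [h2 m]
          constructor
          · rintro (hm | ⟨n, hn, hnd⟩)
            · exact Or.inl hm
            · exact Or.inr ⟨n, List.mem_cons_of_mem _ hn, hnd⟩
          · rintro (hm | ⟨n, hn, hnd⟩)
            · exact Or.inl hm
            · rcases List.mem_cons.mp hn with rfl | hn'
              · rw [hd, hdc] at hnd; cases hnd
              · exact Or.inr ⟨n, hn', hnd⟩
      | some t =>
        by_cases hterm : pvTerm.getD t false = true
        · have hbody : pvScanBody c acc h = (true, acc.2) := by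
            simp only [pvScanBody, hacc, hdc, hterm]; simp
          rw [hbody]
          refine ⟨?_, ?_⟩
          · rw [(ih (true, acc.2)).1]
            simp only [true_or, true_iff]
            exact Or.inr ⟨h, List.mem_cons_self, t, hd ▸ hdc, hterm⟩
          · intro hf
            exact absurd ((ih (true, acc.2)).2 hf).1 (by simp)
        · rw [Bool.not_eq_true] at hterm
          have hbody : pvScanBody c acc h = (acc.1, PySem.Set.add acc.2 t) := by
            simp only [pvScanBody, hacc, hdc, hterm]; simp
          rw [hbody]
          refine ⟨?_, ?_⟩
          · rw [(ih _).1]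
            simp only [hacc]
            constructor
            · rintro (h1 | ⟨n, hn, hex⟩)
              · cases h1
              · exact Or.inr ⟨n, List.mem_cons_of_mem _ hn, hex⟩
            · rintro (h1 | ⟨n, hn, t', hnd, ht'⟩)
              · cases h1
              · rcases List.mem_cons.mp hn with rfl | hn'
                · rw [hd, hdc] at hnd
                  cases hnd
                  rw [hterm] at ht'; cases ht'
                · exact Or.inr ⟨n, hn', t', hnd, ht'⟩
          · intro hf
            obtain ⟨h1, h2⟩ := (ih _).2 hf
            refine ⟨hacc, fun m => ?_⟩
            rw [h2 m, PySem.Set.mem_add]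
            constructor
            · rintro ((hm | rfl) | ⟨n, hn, hnd⟩)
              · exact Or.inl hm
              · exact Or.inr ⟨h, List.mem_cons_self, hd ▸ hdc⟩
              · exact Or.inr ⟨n, List.mem_cons_of_mem _ hn, hnd⟩
            · rintro (hm | ⟨n, hn, hnd⟩)
              · exact Or.inl (Or.inl hm)
              · rcases List.mem_cons.mp hn with rfl | hn'
                · rw [hd, hdc] at hnd
                  cases hnd
                  exact Or.inl (Or.inr rfl)
                · exact Or.inr ⟨n, hn', hnd⟩

theorem pvHitsTerm_some {cs : List Char} {n : Nat} (h : pvWalk cs = some n) :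
    pvHitsTerm cs = pvTerm.getD n false := by
  unfold pvHitsTerm; rw [h]

theorem pvInv_step {p : List Char} {st : Bool × PySem.Set Nat} (c : Char)
    (h : pvInv p st) : pvInv (p ++ [c]) (pvScanStep st c) := by
  obtain ⟨ha, hb⟩ := h
  by_cases hst : st.1 = true
  · have hstep : pvScanStep st c = st := by simp [pvScanStep, hst]
    rw [hstep]
    refine ⟨?_, ?_⟩
    · constructor
      · intro _
        obtain ⟨w, hw, hinf⟩ := ha.mp hst
        exact ⟨w, hw, infix_concat_char.mpr (Or.inl hinf)⟩
      · intro _; exact hst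
    · intro hf; rw [hst] at hf; cases hf
  · rw [Bool.not_eq_true] at hst
    have hnoword : ¬ ∃ w ∈ pvWordsB, w.toList <:+: p := fun hx => by
      have := ha.mpr hx; rw [hst] at this; cases this
    have hstep : pvScanStep st c =
        (PySem.Set.union st.2 (PySem.Set.ofList [0])).foldl (pvScanBody c)
          (false, PySem.Set.empty) := by
      simp [pvScanStep, hst]
    have hmemL : ∀ n, n ∈ PySem.Set.union st.2 (PySem.Set.ofList [0]) ↔
        ∃ s, s <:+ p ∧ pvWalk s = some n := by
      intro n
      rw [PySem.Set.mem_union, PySem.Set.mem_ofList]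
      constructor
      · rintro (hn | hn)
        · obtain ⟨s, hne, hs, hw⟩ := (hb hst n).mp hn
          exact ⟨s, hs, hw⟩
        · have h0 : n = 0 := by simpa using hn
          subst h0
          exact ⟨[], List.nil_suffix, rfl⟩
      · rintro ⟨s, hs, hw⟩
        rcases eq_or_ne s [] with rfl | hne
        · have h0 : n = 0 := by simpa [pvWalk] using hw.symm
          right; simp [h0]
        · left; exact (hb hst n).mpr ⟨s, hne, hs, hw⟩
    obtain ⟨hfold1, hfold2⟩ :=
      pv_inner_fold c (PySem.Set.union st.2 (PySem.Set.ofList [0])) (false, PySem.Set.empty)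
    constructor
    · rw [hstep, hfold1]
      constructor
      · rintro (hfalse | ⟨n, hnL, t, hd, hterm⟩)
        · simp at hfalse
        · obtain ⟨s, hs, hw⟩ := (hmemL n).mp hnL
          have hwt : pvWalk (s ++ [c]) = some t := by
            rw [pvWalk_append, hw]; simp only [Option.bind_some]; exact hd
          have hht : pvHitsTerm (s ++ [c]) = true := by rw [pvHitsTerm_some hwt]; exact hterm
          obtain ⟨w, hwmem, hweq⟩ := (pvHitsTerm_iff _).mp hht
          refine ⟨w, hwmem, ?_⟩
          rw [hweq]
          exact infix_concat_char.mpr (Or.inr (suffix_concat_char.mpr (Or.inr ⟨s, hs, rfl⟩)))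
      · rintro ⟨w, hwmem, hinf⟩
        rcases infix_concat_char.mp hinf with hinf' | hsuf
        · exact absurd ⟨w, hwmem, hinf'⟩ hnoword
        · rcases suffix_concat_char.mp hsuf with hnil | ⟨s, hs, hseq⟩
          · have := List.all_eq_true.mp pv_words_ne_nil w hwmem
            rw [hnil] at this; simp at this
          · have hht : pvHitsTerm w.toList = true := (pvHitsTerm_iff _).mpr ⟨w, hwmem, rfl⟩
            cases hwv : pvWalk w.toList with
            | none => rw [pvHitsTerm, hwv] at hht; simp at hht
            | some t =>
              have hterm : pvTerm.getD t false = true := by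
                rw [pvHitsTerm_some hwv] at hht; exact hht
              rw [hseq, pvWalk_append] at hwv
              cases hwalks : pvWalk s with
              | none => rw [hwalks] at hwv; simp at hwv
              | some n =>
                rw [hwalks] at hwv
                simp only [Option.bind_some] at hwv
                exact Or.inr ⟨n, (hmemL n).mpr ⟨s, hs, hwalks⟩, t, hwv, hterm⟩
    · rw [hstep]
      intro hf n
      obtain ⟨-, h2⟩ := hfold2 hf
      rw [h2 n]
      constructor
      · rintro (hmem | ⟨m, hmL, hd⟩)
        · simp [PySem.Set.empty] at hmem
        · obtain ⟨s, hs, hw⟩ := (hmemL m).mp hmL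
          refine ⟨s ++ [c], by simp, suffix_concat_char.mpr (Or.inr ⟨s, hs, rfl⟩), ?_⟩
          rw [pvWalk_append, hw]; simp only [Option.bind_some]; exact hd
      · rintro ⟨s', hne, hsuf, hw⟩
        rcases suffix_concat_char.mp hsuf with rfl | ⟨s, hs, rfl⟩
        · exact absurd rfl hne
        · rw [pvWalk_append] at hw
          cases hws : pvWalk s with
          | none => rw [hws] at hw; simp at hw
          | some m =>
            rw [hws] at hw
            simp only [Option.bind_some] at hw
            exact Or.inr ⟨m, (hmemL m).mpr ⟨s, hs, hws⟩, hw⟩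

theorem pvInv_foldl (rest : List Char) : ∀ (p : List Char) (st : Bool × PySem.Set Nat),
    pvInv p st → pvInv (p ++ rest) (rest.foldl pvScanStep st) := by
  induction rest with
  | nil => intro p st h; simpa using h
  | cons c rest ih =>
    intro p st h
    have h1 := pvInv_step c h
    have h2 := ih (p ++ [c]) _ h1
    rw [List.foldl_cons]
    rw [List.append_assoc] at h2
    simpa using h2

theorem pvInv_nil : pvInv [] (false, PySem.Set.empty) := by
  constructor
  · simp only [Bool.false_eq_true, false_iff]
    rintro ⟨w, hw, hinf⟩
    have hnil : w.toList = [] := List.eq_nil_of_infix_nil hinf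
    have := List.all_eq_true.mp pv_words_ne_nil w hw
    rw [hnil] at this
    simp at this
  · intro _ n
    constructor
    · intro h; simp [PySem.Set.empty] at h
    · rintro ⟨s, hne, hs, -⟩
      exact absurd (List.suffix_nil.mp hs) hne

-- ===== VERDICT (by name: the statement is the Claim_ definition above) =====
theorem has_written_numbers_spec : Claim_equal_has_written_numbers := by
  intro text _
  unfold Spec_has_written_numbers has_written_numbers has_written_numbers_alt
  have h := (pvInv_foldl (PySem.Str.lower text).toList [] (false, PySem.Set.empty) pvInv_nil).1
  simp only [List.nil_append] at h
  rw [Bool.eq_iff_iff, List.any_eq_true, h]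
  constructor
  · rintro ⟨w, hw, hin⟩
    exact ⟨w, hw, (PySem.Str.isIn_iff_infix _ _).mp hin⟩
  · rintro ⟨w, hw, hinf⟩
    exact ⟨w, hw, (PySem.Str.isIn_iff_infix _ _).mpr hinf⟩
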